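-- pv_equiv track=rewrite | github.com/eriklueth/gesetze-online-corpus | gesetze_corpus/fetchers/vwv/writer.py | _yaml_scalar
-- ===== SOURCE A (Python) =====
-- def _yaml_scalar(text: str) -> str:
--     if not text:
--         return '""'
--     needs = any(c in text for c in ':"\\#') or text[0] in (" ", "-", "?", "[", "{")
--     if needs:
--         escaped = text.replace("\\", "\\\\").replace('"', '\\"')
--         return f'"{escaped}"'
--     return text
-- ===== SOURCE B (Python) =====
-- def _yaml_scalar(text: str) -> str:
--     if not text:
--         return '""'
--     needs = text[0] in (" ", "-", "?", "[", "{")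
--     out = []
--     for c in text:
--         if c == "\\":
--             out.append("\\\\")
--             needs = True
--         elif c == '"':
--             out.append('\\"')
--             needs = True
--         else:
--             out.append(c)
--             if c == ":" or c == "#":
--                 needs = True
--     if needs:
--         return '"' + "".join(out) + '"'
--     return text
-- ===== Notes on version B (the rewrite author's own statement) =====
-- stated objective: alternative
-- what changed: Replaced A's four substring scans followed by two whole-string replace passes with one single-pass loop that simultaneously builds the escaped text and decides whether quoting is needed; it trades A's C-level replace calls for an explicit fused pass.
import Mathlib
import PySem

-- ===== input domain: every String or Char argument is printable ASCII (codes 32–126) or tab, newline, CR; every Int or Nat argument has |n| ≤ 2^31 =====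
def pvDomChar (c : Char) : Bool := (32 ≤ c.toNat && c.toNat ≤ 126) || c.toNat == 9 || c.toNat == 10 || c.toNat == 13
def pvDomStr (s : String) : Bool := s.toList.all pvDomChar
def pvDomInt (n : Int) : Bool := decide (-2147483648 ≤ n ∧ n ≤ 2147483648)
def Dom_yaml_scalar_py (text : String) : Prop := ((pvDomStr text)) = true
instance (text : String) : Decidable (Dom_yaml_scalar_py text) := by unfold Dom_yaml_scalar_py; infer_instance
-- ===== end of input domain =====

-- B fuses A's four substring scans and two replace passes into one loop; objective: alternative (single pass), not measured faster.

-- ===== PORT A =====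
def yaml_scalar_py (text : String) : String :=
  if text = "" then "\"\""
  else
    let needs := ((":\"\\#".toList).any (fun c => PySem.Str.isIn (String.ofList [c]) text))
      || ([' ', '-', '?', '[', '{'].any (fun c => PySem.Str.pyGet? text 0 == some c))
    if needs then
      let escaped := PySem.Str.replace (PySem.Str.replace text "\\" "\\\\") "\"" "\\\""
      String.ofList ('"' :: escaped.toList ++ ['"'])
    else text

-- ===== PORT B =====
def yaml_scalar_py_alt (text : String) : String :=
  match text.toList with
  | [] => "\"\""
  | c0 :: _ =>
    let st := text.toList.foldl
      (fun (acc : List Char × Bool) c =>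
        if c = '\\' then (acc.1 ++ ['\\', '\\'], true)
        else if c = '"' then (acc.1 ++ ['\\', '"'], true)
        else (acc.1 ++ [c], acc.2 || (c == ':' || c == '#')))
      ([], (c0 == ' ' || c0 == '-' || c0 == '?' || c0 == '[' || c0 == '{'))
    if st.2 then String.ofList ('"' :: st.1 ++ ['"']) else text

-- ===== PRECONDITION & SPEC =====
def Spec_yaml_scalar_py (text : String) (out : String) : Prop := out = yaml_scalar_py_alt text
instance (text : String) (out : String) : Decidable (Spec_yaml_scalar_py text out) := by unfold Spec_yaml_scalar_py; infer_instance

-- ===== CLAIM (what is proved, stated in full; the proofs are below) =====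
def Claim_equal_yaml_scalar_py : Prop := ∀ (text : String), Dom_yaml_scalar_py text → Spec_yaml_scalar_py text (yaml_scalar_py text)

-- ===== LEMMAS AND PROOFS =====

-- single-character substitution as a flatMap
def pvSub (a : Char) (new : List Char) (c : Char) : List Char := if c = a then new else [c]

theorem pvGo_single (a : Char) (new : List Char) :
    ∀ (l : List Char) (fuel : Nat) (acc : List Char), l.length ≤ fuel →
      PySem.Chars.replace.go [a] new fuel l acc = acc.reverse ++ l.flatMap (pvSub a new) := by
  intro l
  induction l with
  | nil =>
    intro fuel acc _
    cases fuel <;> simp [PySem.Chars.replace.go]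
  | cons c t ih =>
    intro fuel acc hf
    cases fuel with
    | zero => simp at hf
    | succ n =>
      by_cases hc : c = a
      · subst hc
        have hpre : List.isPrefixOf [c] (c :: t) = true := by simp [List.isPrefixOf]
        simp only [PySem.Chars.replace.go, hpre, if_pos]
        have := ih n (new.reverse ++ acc) (by simpa using Nat.le_of_succ_le_succ hf)
        simp only [List.length_cons, List.length_nil, List.drop_succ_cons, List.drop_zero] at this ⊢
        rw [this]
        simp [pvSub]
      · have hpre : List.isPrefixOf [a] (c :: t) = false := by
          simp [List.isPrefixOf]
          exact fun h => (hc h.symm).elim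
        simp only [PySem.Chars.replace.go, hpre, Bool.false_eq_true, if_false]
        have := ih n (c :: acc) (Nat.le_of_succ_le_succ hf)
        rw [this]
        simp [pvSub, hc]

theorem pvReplace_single (s : List Char) (a : Char) (new : List Char) :
    PySem.Chars.replace s [a] new = s.flatMap (pvSub a new) := by
  have h : PySem.Chars.replace s [a] new = PySem.Chars.replace.go [a] new s.length s [] := by
    simp [PySem.Chars.replace]
  rw [h, pvGo_single a new s s.length [] (le_refl _)]
  simp

def pvEsc (c : Char) : List Char :=
  if c = '\\' then ['\\', '\\'] else if c = '"' then ['\\', '"'] else [c]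

def pvSpec (c : Char) : Bool := c == '\\' || c == '"' || c == ':' || c == '#'

theorem pvEscaped_eq (l : List Char) :
    (l.flatMap (pvSub '\\' ['\\', '\\'])).flatMap (pvSub '"' ['\\', '"']) = l.flatMap pvEsc := by
  rw [List.flatMap_assoc]
  apply List.flatMap_congr
  intro c _
  by_cases h1 : c = '\\'
  · subst h1; simp [pvSub, pvEsc]
  · by_cases h2 : c = '"'
    · subst h2; simp [pvSub, pvEsc]
    · simp [pvSub, pvEsc, h1, h2]

theorem pvFold_eq (l : List Char) : ∀ (acc : List Char) (b : Bool),
    l.foldl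
      (fun (acc : List Char × Bool) c =>
        if c = '\\' then (acc.1 ++ ['\\', '\\'], true)
        else if c = '"' then (acc.1 ++ ['\\', '"'], true)
        else (acc.1 ++ [c], acc.2 || (c == ':' || c == '#')))
      (acc, b) = (acc ++ l.flatMap pvEsc, b || l.any pvSpec) := by
  induction l with
  | nil => intro acc b; simp
  | cons c t ih =>
    intro acc b
    by_cases h1 : c = '\\'
    · subst h1
      simp only [List.foldl_cons]
      norm_num [ih, pvEsc, pvSpec]
    · by_cases h2 : c = '"'
      · subst h2
        simp only [List.foldl_cons, if_neg h1]
        norm_num [ih, pvEsc, pvSpec, if_neg h1]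
      · simp only [List.foldl_cons]
        simp only [if_neg h1, if_neg h2, ih]
        have e1 : (c == '\\') = false := beq_eq_false_iff_ne.mpr h1
        have e2 : (c == '"') = false := beq_eq_false_iff_ne.mpr h2
        have hs : pvSpec c = (c == ':' || c == '#') := by
          simp [pvSpec, e1, e2]
        simp [pvEsc, h1, h2, hs, Bool.or_assoc]

theorem pvMem_iff_singleton_infix (c : Char) (l : List Char) : [c] <:+: l ↔ c ∈ l := by
  constructor
  · intro h
    exact h.subset (by simp)
  · intro h
    obtain ⟨s, t, rfl⟩ := List.append_of_mem h
    exact ⟨s, t, by simp⟩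

theorem pvNeedsScan_eq (text : String) :
    ((":\"\\#".toList).any (fun c => PySem.Str.isIn (String.ofList [c]) text))
      = text.toList.any pvSpec := by
  rw [Bool.eq_iff_iff]
  simp only [List.any_eq_true, PySem.Str.isIn_eq, String.toList_ofList,
    PySem.Chars.isIn_iff_infix]
  constructor
  · rintro ⟨c, hc, hinf⟩
    refine ⟨c, (pvMem_iff_singleton_infix c _).mp hinf, ?_⟩
    fin_cases hc <;> decide
  · rintro ⟨c, hc, hs⟩
    refine ⟨c, ?_, (pvMem_iff_singleton_infix c _).mpr hc⟩
    simp only [pvSpec, Bool.or_eq_true, beq_iff_eq] at hs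
    obtain ((h | h) | h) | h := hs <;> subst h <;> decide

-- ===== VERDICT (by name: the statement is the Claim_ definition above) =====
theorem yaml_scalar_py_spec : Claim_equal_yaml_scalar_py := by
  intro text _
  unfold Spec_yaml_scalar_py
  rcases hl : text.toList with _ | ⟨c0, rest⟩
  · have he : text = "" := String.toList_eq_nil_iff.mp hl
    subst he
    rfl
  · have hne : text ≠ "" := by
      intro h; subst h; simp at hl
    have hget : PySem.Str.pyGet? text 0 = some c0 := by
      rw [show (0 : Int) = ((0 : Nat) : Int) from rfl, PySem.Str.pyGet?_natCast]
      simp [hl]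
    have hfirst : ([' ', '-', '?', '[', '{'].any (fun c => PySem.Str.pyGet? text 0 == some c))
        = (c0 == ' ' || c0 == '-' || c0 == '?' || c0 == '[' || c0 == '{') := by
      simp only [List.any_cons, List.any_nil, hget, Option.some_beq_some, Bool.or_false]
      simp [Bool.or_assoc]
    have hesc : (PySem.Str.replace (PySem.Str.replace text "\\" "\\\\") "\"" "\\\"").toList
        = text.toList.flatMap pvEsc := by
      rw [PySem.Str.toList_replace, PySem.Str.toList_replace]
      show PySem.Chars.replace
          (PySem.Chars.replace text.toList ['\\'] ['\\', '\\']) ['"'] ['\\', '"'] = _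
      rw [pvReplace_single, pvReplace_single, pvEscaped_eq]
    have hA : yaml_scalar_py text =
        (if (text.toList.any pvSpec
              || (c0 == ' ' || c0 == '-' || c0 == '?' || c0 == '[' || c0 == '{')) then
          String.ofList ('"' :: text.toList.flatMap pvEsc ++ ['"'])
        else text) := by
      simp only [yaml_scalar_py, if_neg hne, hfirst, pvNeedsScan_eq, hesc]
    have hB : yaml_scalar_py_alt text =
        (if ((c0 == ' ' || c0 == '-' || c0 == '?' || c0 == '[' || c0 == '{')
              || (c0 :: rest).any pvSpec) then
          String.ofList ('"' :: (c0 :: rest).flatMap pvEsc ++ ['"'])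
        else text) := by
      simp only [yaml_scalar_py_alt, hl, pvFold_eq, List.nil_append]
    rw [hA, hB, hl, Bool.or_comm]
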